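-- pv_equiv track=rewrite | github.com/ARoennau/test-aoc-repo | python/27.py | create_counts
-- ===== SOURCE A (Python) =====
-- from typing import Dict, List, Tuple
--
-- def create_counts(template: List[str], rules: Dict[str, str]) -> Dict[str, int]:
--     counts = {}
--     for letter in template:
--         if letter in counts.keys():
--             counts[letter] += 1
--         else:
--             counts[letter] = 1
--
--     for letter in rules.values():
--         if letter not in counts.keys():
--             counts[letter] = 0
--
--     return counts
-- ===== SOURCE B (Python) =====
-- def create_counts(template, rules):
--     counts = {}
--     remaining = list(template)
--     while remaining:
--         letter = remaining[0]
--         rest = [x for x in remaining[1:] if x != letter]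
--         counts[letter] = len(remaining) - len(rest)
--         remaining = rest
--     for v in rules.values():
--         counts.setdefault(v, 0)
--     return counts
-- ===== Notes on version B (the rewrite author's own statement) =====
-- stated objective: alternative
-- what changed: Replaces A's single-pass accumulating count dict by a selection-style while loop: repeatedly take the first remaining letter, filter all its copies out of the list, and record its count as the length difference; zero-init of rule outputs uses setdefault.
import Mathlib
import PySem

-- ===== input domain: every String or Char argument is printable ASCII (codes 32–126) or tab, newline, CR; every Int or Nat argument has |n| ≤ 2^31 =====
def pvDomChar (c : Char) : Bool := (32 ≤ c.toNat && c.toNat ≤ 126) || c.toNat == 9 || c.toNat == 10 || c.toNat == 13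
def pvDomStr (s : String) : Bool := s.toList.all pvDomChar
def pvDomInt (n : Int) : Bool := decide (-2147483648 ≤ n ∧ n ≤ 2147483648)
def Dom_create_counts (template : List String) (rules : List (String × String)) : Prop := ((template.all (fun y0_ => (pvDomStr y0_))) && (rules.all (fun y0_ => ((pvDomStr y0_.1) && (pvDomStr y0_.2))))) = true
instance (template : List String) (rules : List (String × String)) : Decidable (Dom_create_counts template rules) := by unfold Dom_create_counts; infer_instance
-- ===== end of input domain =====

-- B replaces A's one-pass accumulating count dict by a selection-style loop: take the first
-- remaining letter, filter all its copies out, record the count as the length difference.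

-- ===== PORT A =====
def create_counts (template : List String) (rules : List (String × String)) : List (String × Int) :=
  -- counts = {}; for letter in template: if in counts: +=1 else =1
  let counts : PySem.Dict String Int :=
    template.foldl
      (fun d letter =>
        if d.contains letter then d.insert letter (d.getD letter 0 + 1)
        else d.insert letter 1)
      PySem.Dict.empty
  -- for letter in rules.values(): if letter not in counts: counts[letter] = 0
  let counts :=
    (rules.map Prod.snd).foldl
      (fun d letter => if d.contains letter then d else d.insert letter 0)
      counts
  counts.items

-- ===== PORT B =====
-- while remaining: letter = remaining[0]; rest = [x for x in remaining[1:] if x != letter];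
--                  counts[letter] = len(remaining) - len(rest); remaining = rest
def pvAltLoop : List String → PySem.Dict String Int → PySem.Dict String Int
  | [], counts => counts
  | letter :: t, counts =>
    let rest := t.filter (fun x => x ≠ letter)
    pvAltLoop rest
      (counts.insert letter (((letter :: t).length : Int) - (rest.length : Int)))
termination_by ts _ => ts.length
decreasing_by
  simpa [List.length_unattach] using Nat.lt_succ_of_le (List.length_filter_le _ t.attach)

def create_counts_alt (template : List String) (rules : List (String × String)) : List (String × Int) :=
  let counts := pvAltLoop template PySem.Dict.empty
  -- for v in rules.values(): counts.setdefault(v, 0)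
  let counts :=
    (rules.map Prod.snd).foldl (fun d v => d.setdefault v 0) counts
  counts.items

-- ===== PRECONDITION & SPEC =====
def Spec_create_counts (template : List String) (rules : List (String × String)) (out : List (String × Int)) : Prop := out = create_counts_alt template rules
instance (template : List String) (rules : List (String × String)) (out : List (String × Int)) : Decidable (Spec_create_counts template rules out) := by unfold Spec_create_counts; infer_instance

-- ===== CLAIM (what is proved, stated in full; the proofs are below) =====
def Claim_equal_create_counts : Prop := ∀ (template : List String) (rules : List (String × String)), Dom_create_counts template rules → Spec_create_counts template rules (create_counts template rules)

-- ===== LEMMAS AND PROOFS =====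

-- A's first loop is exactly the Counter fold.
theorem loop1_eq_counter (template : List String) :
    template.foldl
      (fun (d : PySem.Dict String Int) letter =>
        if d.contains letter then d.insert letter (d.getD letter 0 + 1)
        else d.insert letter 1)
      PySem.Dict.empty = PySem.Dict.counter template := by
  rw [PySem.Dict.counter_eq_foldl]
  congr 1
  funext d letter
  by_cases h : d.contains letter = true
  · simp [h, PySem.Dict.modify]
  · have hget : d.getD letter 0 = 0 := PySem.Dict.getD_of_not_contains d 0 (by simpa using h)
    simp [h, PySem.Dict.modify, hget]

-- Invariant of the shared second loop: items stay "keys mapped to their template-count".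
theorem loop2_items (template : List String) (vals : List String) :
    ∀ (S : List String) (d : PySem.Dict String Int),
      d.items = S.map (fun l => (l, (template.count l : Int))) →
      (∀ x, x ∈ template → x ∈ S) →
      (vals.foldl
        (fun d letter => if d.contains letter then d else d.insert letter 0) d).items
        = (PySem.Set.update S vals).map (fun l => (l, (template.count l : Int))) := by
  induction vals with
  | nil => intro S d hd _; simpa [PySem.Set.update] using hd
  | cons v vs ih =>
    intro S d hd hmem
    have hcont : d.contains v = decide (v ∈ S) := by
      simp [PySem.Dict.contains, hd, List.any_map, Function.comp_def, List.any_beq', List.contains_eq_mem]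
    by_cases hv : v ∈ S
    · rw [List.foldl_cons, hcont]
      simp only [hv, decide_true, if_true]
      have hupd : PySem.Set.update S (v :: vs) = PySem.Set.update S vs := by
        simp [PySem.Set.update, PySem.Set.add, PySem.Set.contains, hv]
      rw [hupd]; exact ih S d hd hmem
    · rw [List.foldl_cons, hcont]
      simp only [hv, decide_false, Bool.false_eq_true, if_false]
      have hvt : v ∉ template := fun h => hv (hmem v h)
      have hins : (d.insert v 0).items = d.items ++ [(v, 0)] := by
        simp [PySem.Dict.insert, PySem.Dict.contains, hd, List.any_map, Function.comp_def, hv]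
      have hupd : PySem.Set.update S (v :: vs) = PySem.Set.update (S ++ [v]) vs := by
        simp [PySem.Set.update, PySem.Set.add, PySem.Set.contains, hv]
      rw [hupd]
      refine ih (S ++ [v]) (d.insert v 0) ?_ ?_
      · simp [hins, hd, List.count_eq_zero.mpr hvt]
      · intro x hx; exact List.mem_append_left _ (hmem x hx)

-- B's setdefault loop is the same fold as A's second loop.
theorem setdefault_loop_eq (vals : List String) (d : PySem.Dict String Int) :
    vals.foldl (fun d v => d.setdefault v 0) d
      = vals.foldl (fun d letter => if d.contains letter then d else d.insert letter 0) d := by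
  induction vals generalizing d with
  | nil => rfl
  | cons v vs ih =>
    simp only [List.foldl_cons]
    by_cases h : d.contains v = true
    · rw [PySem.Dict.setdefault_of_contains d 0 h, if_pos h, ih]
    · rw [PySem.Dict.setdefault_of_not_contains d 0 (by simpa using h),
        if_neg (by simp [h]), ih]

-- length of the ≠-filtered list plus the count of the removed letter is the full length
theorem len_filter_ne_add_count (t : List String) (a : String) :
    (t.filter (fun x => x ≠ a)).length + t.count a = t.length := by
  induction t with
  | nil => simp
  | cons x t ih =>
    simp only [ne_eq, decide_not] at ih ⊢
    by_cases h : x = a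
    · subst h
      rw [List.count_cons_self, List.filter_cons_of_neg (by simp)]
      simp only [List.length_cons]
      omega
    · rw [List.count_cons_of_ne h, List.filter_cons_of_pos (by simp [h])]
      simp only [List.length_cons]
      omega

-- dedup commutes with filter (via the Set.update accumulator).
theorem update_filter (p : String → Bool) :
    ∀ (t s : List String), (PySem.Set.update s t).filter p = PySem.Set.update (s.filter p) (t.filter p) := by
  intro t
  induction t with
  | nil => intro s; simp [PySem.Set.update]
  | cons x t ih =>
    intro s
    rw [PySem.Set.update_cons]
    by_cases hp : p x = true
    · rw [List.filter_cons_of_pos hp, PySem.Set.update_cons, ih]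
      congr 1
      simp only [PySem.Set.add, PySem.Set.contains]
      by_cases hm : x ∈ s
      · simp [List.contains_eq_mem, hm, List.mem_filter, hp]
      · simp [List.contains_eq_mem, hm, List.mem_filter, List.filter_append, hp]
    · rw [List.filter_cons_of_neg (by simpa using hp), ih]
      congr 1
      simp only [PySem.Set.add, PySem.Set.contains]
      by_cases hm : x ∈ s
      · simp [hm]
      · simp [List.contains_eq_mem, hm, List.filter_append, hp]

theorem dedup_filter (p : String → Bool) (t : List String) :
    PySem.List.dedup (t.filter p) = (PySem.List.dedup t).filter p := by
  simp only [PySem.List.dedup_eq_ofList, ← PySem.Set.update_nil_left]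
  simpa using (update_filter p t []).symm

-- first letter, then the dedup of the list purged of it
theorem dedup_cons (letter : String) (t : List String) :
    PySem.List.dedup (letter :: t)
      = letter :: PySem.List.dedup (t.filter (fun x => x ≠ letter)) := by
  rw [dedup_filter]
  simp only [PySem.List.dedup_eq_ofList, ← PySem.Set.update_nil_left]
  rw [PySem.Set.update_cons]
  have hadd : PySem.Set.add ([] : List String) letter = [letter] := rfl
  rw [hadd, PySem.Set.update_eq_append_filter]
  simp only [List.singleton_append, List.cons.injEq, true_and]
  rw [PySem.Set.update_nil_left]
  exact List.filter_congr (fun a _ => by simp [PySem.Set.contains, eq_comm])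

-- B's selection loop produces the dedup'd keys with their counts.
theorem pvAltLoop_items (ts : List String) (d : PySem.Dict String Int) :
    (∀ k, k ∈ d.keys → k ∉ ts) →
    (pvAltLoop ts d).items
      = d.items ++ (PySem.List.dedup ts).map (fun l => (l, (ts.count l : Int))) := by
  induction ts, d using pvAltLoop.induct with
  | case1 d => intro _; simp [pvAltLoop, PySem.List.dedup]
  | case2 letter t d rest ih =>
    intro hk
    have hrest : rest = t.filter (fun x => x ≠ letter) := by
      show (List.filter _ t.attach).unattach = _
      rw [List.unattach_filter (g := fun x => decide (x ≠ letter)) (hf := fun x h => rfl)]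
      simp
    rw [hrest] at ih
    clear_value rest
    subst hrest
    have hnc : d.contains letter = false := by
      rw [PySem.Dict.contains_eq_decide_mem_keys]
      simp only [decide_eq_false_iff_not]
      exact fun hm => hk letter hm (List.mem_cons_self)
    rw [pvAltLoop]
    rw [ih ?_]
    · rw [PySem.Dict.items_insert_of_not_contains d _ hnc, dedup_cons, List.map_cons,
        List.append_assoc]
      congr 2
      · -- inserted value is the count of letter in letter :: t
        have := len_filter_ne_add_count t letter
        have hcnt : (letter :: t).count letter = t.count letter + 1 := List.count_cons_self
        simp only [List.cons_append, List.nil_append, List.cons.injEq, Prod.mk.injEq, true_and, List.length_cons]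
        constructor
        · rw [hcnt]; push_cast; omega
        · -- counts of the remaining letters agree between rest and letter :: t
          apply List.map_congr_left
          intro l hl
          have hlr : l ∈ t.filter (fun x => x ≠ letter) := (PySem.List.mem_dedup _ _).mp hl
          have hlne : l ≠ letter := by
            have := List.mem_filter.mp hlr
            simpa using this.2
          rw [List.count_filter (by simpa using hlne)]
          have hne' : ¬letter = l := fun h => hlne h.symm
          simp [hne']
    · intro k hkm
      rw [PySem.Dict.keys_insert_of_not_contains d _ hnc] at hkm
      rcases List.mem_append.mp hkm with h1 | h1
      · exact fun hr => hk k h1 (List.mem_cons_of_mem _ (List.mem_of_mem_filter hr))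
      · have hkl : k = letter := by simpa using h1
        subst hkl
        exact fun hr => by simpa using (List.mem_filter.mp hr).2

-- ===== VERDICT (by name: the statement is the Claim_ definition above) =====
theorem create_counts_spec : Claim_equal_create_counts := by
  intro template rules _
  simp only [Spec_create_counts, create_counts, create_counts_alt]
  rw [loop1_eq_counter, setdefault_loop_eq]
  rw [loop2_items template (rules.map Prod.snd) (PySem.Set.ofList template)
        (PySem.Dict.counter template)
        (by simpa using PySem.Dict.items_counter template)
        (fun x hx => (PySem.Set.mem_ofList template x).mpr hx)]
  rw [loop2_items template (rules.map Prod.snd) (PySem.List.dedup template)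
        (pvAltLoop template PySem.Dict.empty)
        (by simpa using pvAltLoop_items template PySem.Dict.empty (by simp [PySem.Dict.keys_empty]))
        (fun x hx => (PySem.List.mem_dedup _ _).mpr hx)]
  simp [PySem.List.dedup_eq_ofList]
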